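-- pv_equiv track=rewrite | github.com/abhirajkuntal/LeetCode-Solutions-Personal | 2264.py | good_integer
-- ===== SOURCE A (Python) =====
-- def good_integer(num):
--
--     curr_window = num[0]
--     res = "0"
--
--     count = 1
--     right = 1
--
--     while right < len(num):
--
--         if int(num[right]) == int(num[right - 1]) and count < 3:
--
--             count += 1
--             curr_window += num[right]
--
--         else:
--
--             count = 1
--             curr_window = num[right]
--
--
--         if count == 3 and int(curr_window[0]) >= int(res[0]):
--             res = curr_window
--
--         right += 1
--
--     return res if res != "0" else ""
-- ===== SOURCE B (Python) =====
-- def good_integer(num):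
--     # run-length encode, then pick the largest digit whose run is >= 3
--     prev = num[0]
--     length = 1
--     groups = []
--     for ch in num[1:]:
--         if int(ch) == int(prev):
--             length += 1
--         else:
--             groups.append((prev, length))
--             prev, length = ch, 1
--     groups.append((prev, length))
--     best = None
--     for d, L in groups:
--         if L >= 3 and (best is None or best < d):
--             best = d
--     return best * 3 if best is not None else ''
-- ===== Notes on version B (the rewrite author's own statement) =====
-- stated objective: alternative
-- what changed: Replaces A's single-pass capped-count sliding window (which carries a growing window string and updates the best window in-loop) with a run-length-encoding pass that builds (digit, run length) groups, followed by a separate max-selection pass over the groups that returns the best digit tripled.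
import Mathlib
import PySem

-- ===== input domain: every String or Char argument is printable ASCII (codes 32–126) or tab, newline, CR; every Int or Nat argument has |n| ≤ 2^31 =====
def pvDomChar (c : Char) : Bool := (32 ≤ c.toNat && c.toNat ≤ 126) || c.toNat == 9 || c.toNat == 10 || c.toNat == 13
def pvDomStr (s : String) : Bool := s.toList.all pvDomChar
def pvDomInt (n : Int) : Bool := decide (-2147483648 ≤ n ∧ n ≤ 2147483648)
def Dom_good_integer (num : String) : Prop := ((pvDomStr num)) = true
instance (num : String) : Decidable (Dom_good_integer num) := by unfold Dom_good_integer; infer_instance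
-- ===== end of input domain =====

-- B replaces A's capped-count sliding window with a run-length-encoding pass plus a
-- separate max-selection pass over the groups (objective: alternative decomposition).

-- ===== PORT A =====
-- int(c) for a single character, exact on '0'..'9' (elsewhere Python raises; excluded by Pre_)
def digitVal (c : Char) : Int := (c.toNat : Int) - 48

-- while loop of A; state (curr_window, res, count) and index `right`
def goA (l : List Char) (right : Nat) (curr res : List Char) (count : Int) : List Char :=
  if _h : right < l.length then
    let c := l.getD right ' '
    let p := l.getD (right - 1) ' '
    let count1 := if digitVal c = digitVal p ∧ count < 3 then count + 1 else 1
    let curr1 := if digitVal c = digitVal p ∧ count < 3 then curr ++ [c] else [c]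
    -- curr_window[0] / res[0]: both strings are always nonempty here, so headD is exact
    let res1 := if count1 = 3 ∧ digitVal (res.headD '0') ≤ digitVal (curr1.headD '0') then curr1 else res
    goA l (right + 1) curr1 res1 count1
  else res
termination_by l.length - right
decreasing_by omega

def good_integer (num : String) : String :=
  match num.toList with
  | [] => ""   -- Python raises IndexError on num[0]; excluded by Pre_
  | c :: _ =>
      let r := goA num.toList 1 [c] ['0'] 1
      if r ≠ ['0'] then String.ofList r else ""

-- ===== PORT B =====
-- the run-length-encoding loop of B, starting from the group (prev, length);
-- int(ch) == int(prev) is digitVal equality (exact on digits; elsewhere Python raises, excluded by Pre_)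
def bGroups (l : List Char) (prev : Char) (length : Int) : List (Char × Int) :=
  match l with
  | [] => [(prev, length)]
  | ch :: rest =>
      if digitVal ch = digitVal prev then bGroups rest prev (length + 1)
      else (prev, length) :: bGroups rest ch 1

-- one step of B's max-selection loop ('L >= 3 and (best is None or best < d)')
def bStep (b : Option Char) (g : Char × Int) : Option Char :=
  match b with
  | none => if 3 ≤ g.2 then some g.1 else none
  | some e => if 3 ≤ g.2 ∧ e < g.1 then some g.1 else some e

def good_integer_alt (num : String) : String :=
  match num.toList with
  | [] => ""   -- Python raises IndexError on num[0]; excluded by Pre_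
  | c :: rest =>
      match (bGroups rest c 1).foldl bStep none with
      | some d => String.ofList [d, d, d]
      | none => ""

-- ===== PRECONDITION & SPEC =====
-- Pre_ excludes exactly the inputs where Python A raises: the empty string (IndexError on
-- num[0]) and strings of length ≥ 2 containing a non-digit (ValueError from int(num[right])).
def Pre_good_integer (num : String) : Prop :=
  num.toList ≠ [] ∧ (num.toList.length = 1 ∨ num.toList.all Char.isDigit)
instance (num : String) : Decidable (Pre_good_integer num) := by unfold Pre_good_integer; infer_instance
def pvWitness_good_integer : String := "333"

def Spec_good_integer (num : String) (out : String) : Prop := out = good_integer_alt num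
instance (num : String) (out : String) : Decidable (Spec_good_integer num out) := by unfold Spec_good_integer; infer_instance

-- ===== CLAIM (what is proved, stated in full; the proofs are below) =====
def Claim_equal_good_integer : Prop := ∀ (num : String), Dom_good_integer num → Pre_good_integer num → Spec_good_integer num (good_integer num)

-- ===== LEMMAS AND PROOFS =====

-- proof-side helpers: res as an optional best digit, and the 'max with p' update
def optRep (b : Option Char) : List Char :=
  match b with | none => ['0'] | some d => [d, d, d]

def chmax (b : Option Char) (p : Char) : Option Char :=
  match b with
  | none => some p
  | some d => if d ≤ p then some p else some d

-- A's loop rephrased on the suffix with explicit previous character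
def goS (t : List Char) (p : Char) (curr res : List Char) (count : Int) : List Char :=
  match t with
  | [] => res
  | c :: t' =>
      let count1 := if digitVal c = digitVal p ∧ count < 3 then count + 1 else 1
      let curr1 := if digitVal c = digitVal p ∧ count < 3 then curr ++ [c] else [c]
      let res1 := if count1 = 3 ∧ digitVal (res.headD '0') ≤ digitVal (curr1.headD '0') then curr1 else res
      goS t' c curr1 res1 count1

lemma char_toNat_inj (c p : Char) (h : c.toNat = p.toNat) : c = p := by
  apply Char.ext; unfold Char.toNat at h; exact UInt32.toNat_inj.mp h

lemma char_le_iff (c p : Char) : c ≤ p ↔ c.toNat ≤ p.toNat := by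
  rw [Char.le_def]; unfold Char.toNat; exact UInt32.le_iff_toNat_le

lemma digitVal_eq_iff (c p : Char) : digitVal c = digitVal p ↔ c = p := by
  unfold digitVal
  constructor
  · intro h; exact char_toNat_inj c p (by omega)
  · intro h; rw [h]

lemma digitVal_le_iff (c p : Char) : digitVal c ≤ digitVal p ↔ c ≤ p := by
  unfold digitVal; rw [char_le_iff]; omega

lemma bStep_eq_chmax (b : Option Char) (p : Char) (k : Int) (hk : 3 ≤ k) :
    bStep b (p, k) = chmax b p := by
  cases b with
  | none => simp [bStep, chmax, hk]
  | some d =>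
      by_cases h : d < p
      · simp [bStep, chmax, hk, h, le_of_lt h]
      · by_cases h2 : d ≤ p
        · have : d = p := le_antisymm h2 (not_lt.mp h)
          simp [bStep, chmax, hk, this]
        · simp [bStep, chmax, hk, h, h2]

lemma chmax_chmax (b : Option Char) (p : Char) : chmax (chmax b p) p = chmax b p := by
  cases b with
  | none => simp [chmax]
  | some d =>
      by_cases h : d ≤ p
      · simp [chmax, h]
      · simp [chmax, h]

lemma foldBest_chmax : ∀ (t : List Char) (p : Char) (k : Int) (b : Option Char), 3 ≤ k →
    (bGroups t p k).foldl bStep b = (bGroups t p k).foldl bStep (chmax b p) := by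
  intro t
  induction t with
  | nil =>
      intro p k b hk
      simp [bGroups, List.foldl, bStep_eq_chmax _ _ _ hk, chmax_chmax]
  | cons c t' ih =>
      intro p k b hk
      by_cases hc : c = p
      · rw [bGroups, if_pos (by rw [hc])]
        exact ih p (k + 1) b (by omega)
      · rw [bGroups, if_neg (fun h => hc ((digitVal_eq_iff c p).mp h))]
        simp only [List.foldl_cons]
        rw [bStep_eq_chmax _ _ _ hk, bStep_eq_chmax _ _ _ hk, chmax_chmax]

lemma foldBest_congr : ∀ (t : List Char) (p : Char) (k1 k2 : Int) (d : Char), ¬ d < p →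
    (bGroups t p k1).foldl bStep (some d) = (bGroups t p k2).foldl bStep (some d) := by
  intro t
  induction t with
  | nil =>
      intro p k1 k2 d h
      simp [bGroups, List.foldl, bStep, h]
  | cons c t' ih =>
      intro p k1 k2 d h
      by_cases hc : c = p
      · rw [bGroups, if_pos (by rw [hc]), bGroups, if_pos (by rw [hc])]
        exact ih p (k1 + 1) (k2 + 1) d h
      · rw [bGroups, if_neg (fun hh => hc ((digitVal_eq_iff c p).mp hh)),
           bGroups, if_neg (fun hh => hc ((digitVal_eq_iff c p).mp hh))]
        simp [bStep, h]

lemma goS_eq : ∀ (t : List Char) (p : Char) (k : Int) (b : Option Char),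
    1 ≤ k → k ≤ 3 → 48 ≤ p.toNat → (∀ c ∈ t, 48 ≤ c.toNat) →
    (k = 3 → ∃ d, b = some d ∧ p ≤ d) →
    goS t p (List.replicate k.toNat p) (optRep b) k
      = optRep ((bGroups t p k).foldl bStep b) := by
  intro t
  induction t with
  | nil =>
      intro p k b hk1 hk3 hp ht hb
      by_cases hk : k = 3
      · obtain ⟨d, hbd, hpd⟩ := hb hk
        simp [goS, bGroups, List.foldl, bStep, hbd, not_lt.mpr hpd]
      · have h3 : ¬ (3:Int) ≤ k := by omega
        cases b <;> simp [goS, bGroups, List.foldl, bStep, h3]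
  | cons c t' ih =>
      intro p k b hk1 hk3 hp ht hb
      have ht' : ∀ x ∈ t', 48 ≤ x.toNat := fun x hx => ht x (List.mem_cons_of_mem _ hx)
      by_cases hc : c = p
      · subst hc
        by_cases hk : k < 3
        · by_cases h3 : k + 1 = 3
          · -- count reaches 3 (k = 2): res is updated to [c,c,c] when c beats res's head
            have hk2 : k = 2 := by omega
            subst hk2
            have hcnd : digitVal c = digitVal c ∧ (2:Int) < 3 := ⟨rfl, by norm_num⟩
            rw [goS, if_pos hcnd, if_pos hcnd]
            have hcur : List.replicate (2:Int).toNat c ++ [c] = List.replicate (3:Int).toNat c := rfl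
            rw [hcur]
            have h21 : (2:Int) + 1 = 3 := by norm_num
            rw [h21]
            have hhd : (List.replicate (3:Int).toNat c).headD '0' = c := rfl
            rw [hhd]
            have hres : (if (3:Int) = 3 ∧ digitVal ((optRep b).headD '0') ≤ digitVal c
                then List.replicate (3:Int).toNat c else optRep b) = optRep (chmax b c) := by
              cases b with
              | none =>
                  have hle : digitVal ((optRep (none : Option Char)).headD '0') ≤ digitVal c := by
                    unfold optRep digitVal; simp; omega
                  rw [if_pos ⟨rfl, hle⟩]; rfl
              | some d =>
                  by_cases hd : d ≤ c
                  · have hle : digitVal ((optRep (some d)).headD '0') ≤ digitVal c := by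
                      unfold optRep; simpa using (digitVal_le_iff d c).mpr hd
                    rw [if_pos ⟨rfl, hle⟩]; simp [chmax, hd, optRep, List.replicate]
                  · have hle : ¬ ((3:Int) = 3 ∧ digitVal ((optRep (some d)).headD '0') ≤ digitVal c) := by
                      intro h
                      exact hd ((digitVal_le_iff d c).mp (by simpa [optRep] using h.2))
                    rw [if_neg hle]; simp [chmax, hd]
            rw [hres]
            have hinv : (3:Int) = 3 → ∃ d, chmax b c = some d ∧ c ≤ d := by
              intro _
              cases b with
              | none => exact ⟨c, rfl, le_refl c⟩
              | some d =>
                  by_cases hd : d ≤ c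
                  · exact ⟨c, by simp [chmax, hd], le_refl c⟩
                  · exact ⟨d, by simp [chmax, hd], le_of_not_ge hd⟩
            rw [ih c 3 (chmax b c) (by norm_num) (by norm_num) hp ht' hinv]
            have hg : bGroups (c :: t') c 2 = bGroups t' c 3 := by
              rw [bGroups, if_pos rfl, h21]
            rw [hg, foldBest_chmax t' c 3 b (by norm_num)]
          · -- count becomes 2 (k = 1): res unchanged
            have hk1' : k = 1 := by omega
            subst hk1'
            have hcnd : digitVal c = digitVal c ∧ (1:Int) < 3 := ⟨rfl, by norm_num⟩
            rw [goS, if_pos hcnd, if_pos hcnd]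
            have hcur : List.replicate (1:Int).toNat c ++ [c] = List.replicate (2:Int).toNat c := rfl
            rw [hcur]
            have h11 : (1:Int) + 1 = 2 := by norm_num
            rw [h11]
            have hno : ¬ ((2:Int) = 3 ∧ digitVal ((optRep b).headD '0')
                ≤ digitVal ((List.replicate (2:Int).toNat c).headD '0')) := by
              intro h; exact absurd h.1 (by norm_num)
            rw [if_neg hno]
            rw [ih c 2 b (by norm_num) (by norm_num) hp ht' (fun h => absurd h (by norm_num))]
            have hg : bGroups (c :: t') c 1 = bGroups t' c 2 := by
              rw [bGroups, if_pos rfl, h11]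
            rw [hg]
        · -- k = 3 and the run continues: count resets to 1, res unchanged
          have hk3' : k = 3 := by omega
          subst hk3'
          obtain ⟨d, hbd, hpd⟩ := hb rfl
          have hcnd : ¬ (digitVal c = digitVal c ∧ (3:Int) < 3) := by
            intro h; exact absurd h.2 (by norm_num)
          rw [goS, if_neg hcnd, if_neg hcnd]
          have hno : ¬ ((1:Int) = 3 ∧ digitVal ((optRep b).headD '0')
              ≤ digitVal (([c] : List Char).headD '0')) := by
            intro h; exact absurd h.1 (by norm_num)
          rw [if_neg hno]
          have hrep1 : ([c] : List Char) = List.replicate (1:Int).toNat c := rfl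
          rw [hrep1, ih c 1 b (by norm_num) (by norm_num) hp ht' (fun h => absurd h (by norm_num))]
          have hg : bGroups (c :: t') c 3 = bGroups t' c 4 := by
            rw [bGroups, if_pos rfl]; norm_num
          rw [hg, hbd, foldBest_congr t' c 1 4 d (not_lt.mpr hpd)]
      · -- new character: count resets to 1, the group (p, k) is closed without effect
        have hp' : 48 ≤ c.toNat := ht c (List.mem_cons_self ..)
        have hcnd : ¬ (digitVal c = digitVal p ∧ k < 3) := by
          intro h; exact hc ((digitVal_eq_iff c p).mp h.1)
        rw [goS, if_neg hcnd, if_neg hcnd]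
        have hno : ¬ ((1:Int) = 3 ∧ digitVal ((optRep b).headD '0')
            ≤ digitVal (([c] : List Char).headD '0')) := by
          intro h; exact absurd h.1 (by norm_num)
        rw [if_neg hno]
        have hrep1 : ([c] : List Char) = List.replicate (1:Int).toNat c := rfl
        rw [hrep1, ih c 1 b (by norm_num) (by norm_num) hp' ht' (fun h => absurd h (by norm_num))]
        have hg : bGroups (c :: t') p k = (p, k) :: bGroups t' c 1 := by
          rw [bGroups, if_neg (fun hh => hc ((digitVal_eq_iff c p).mp hh))]
        have hstep : bStep b (p, k) = b := by
          by_cases h3 : (3:Int) ≤ k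
          · have : k = 3 := by omega
            obtain ⟨d, hbd, hpd⟩ := hb this
            rw [hbd]
            simp [bStep, not_lt.mpr hpd]
          · cases b with
            | none => simp [bStep, h3]
            | some d => simp [bStep, h3]
        rw [hg, List.foldl_cons, hstep]

lemma goA_eq_goS : ∀ (n : Nat) (l : List Char) (right : Nat) (curr res : List Char) (k : Int),
    l.length ≤ right + n → 1 ≤ right →
    goA l right curr res k = goS (l.drop right) (l.getD (right - 1) ' ') curr res k := by
  intro n
  induction n with
  | zero =>
      intro l right curr res k hlen hr
      rw [goA]
      have h : ¬ right < l.length := by omega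
      rw [dif_neg h, List.drop_eq_nil_of_le (by omega)]
      rfl
  | succ m ih =>
      intro l right curr res k hlen hr
      by_cases h : right < l.length
      · rw [goA, dif_pos h, List.drop_eq_getElem_cons h, goS]
        have hc : l.getD right ' ' = l[right] := List.getD_eq_getElem l ' ' h
        have hw : right + 1 - 1 = right := by omega
        rw [ih l (right + 1) _ _ _ (by omega) (by omega), hw]
        simp only [hc]
      · rw [goA, dif_neg h, List.drop_eq_nil_of_le (by omega)]
        rfl

-- ===== VERDICT (by name: the statement is the Claim_ definition above) =====
theorem good_integer_spec : Claim_equal_good_integer := by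
  intro num _hdom hpre
  unfold Spec_good_integer
  obtain ⟨hne, hor⟩ := hpre
  cases hl : num.toList with
  | nil => exact absurd hl hne
  | cons c rest =>
    simp only [good_integer, good_integer_alt, hl]
    rcases hor with hlen | hdig
    · -- length-one string: the loop never runs, both sides return ""
      rw [hl] at hlen
      have hrest : rest = [] := by
        simp only [List.length_cons] at hlen
        exact List.eq_nil_of_length_eq_zero (by omega)
      subst hrest
      rw [goA]
      norm_num [bGroups, bStep, List.foldl]
    · -- all-digit string
      rw [hl] at hdig
      have hdig' := List.all_eq_true.mp hdig
      have hd48 : ∀ x ∈ (c :: rest), 48 ≤ x.toNat := by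
        intro x hx
        have hx' := hdig' x hx
        simp only [Char.isDigit, Bool.and_eq_true, decide_eq_true_eq] at hx'
        have h1 := (char_le_iff '0' x).mp hx'.1
        simpa using h1
      have hbridge := goA_eq_goS rest.length (c :: rest) 1 [c] ['0'] 1
        (by simp) (by norm_num)
      have hdrop : (c :: rest).drop 1 = rest := rfl
      have hget : (c :: rest).getD 0 ' ' = c := rfl
      rw [hdrop, hget] at hbridge
      have hmain := goS_eq rest c 1 none (by norm_num) (by norm_num)
        (hd48 c (List.mem_cons_self ..))
        (fun x hx => hd48 x (List.mem_cons_of_mem _ hx))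
        (fun h => absurd h (by norm_num))
      have hrep : List.replicate (1:Int).toNat c = [c] := rfl
      rw [hrep] at hmain
      have hopt : optRep none = ['0'] := rfl
      rw [hopt] at hmain
      rw [hbridge, hmain]
      cases hf : (bGroups rest c 1).foldl bStep none with
      | none => simp [optRep]
      | some d => simp [optRep]
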